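-- pv_equiv track=rewrite | github.com/ark9164-create/ESBO-Case-Study | pipeline/build_json.py | build_coverage
-- ===== SOURCE A (Python) =====
-- VENUE_KEYS = ["esb", "edge", "summit", "totr"]
--
-- def build_coverage(latest):
--     """Coverage summary from latest snapshot data."""
--     coverage = {}
--     for vk in VENUE_KEYS:
--         rows = latest.get(vk, [])
--         scrape_dates = {r["scrape_date"] for r in rows if r.get("scrape_date")}
--         travel_dates = sorted(r["travel_date"] for r in rows if r.get("travel_date"))
--         coverage[vk] = {
--             "scrape_date": max(scrape_dates) if scrape_dates else None,
--             "travel_from": travel_dates[0] if travel_dates else None,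
--             "travel_through": travel_dates[-1] if travel_dates else None,
--         }
--     return coverage
-- ===== SOURCE B (Python) =====
-- VENUE_KEYS = ["esb", "edge", "summit", "totr"]
--
-- def build_coverage(latest):
--     """Coverage summary from latest snapshot data (single pass per venue)."""
--     coverage = {}
--     for vk in VENUE_KEYS:
--         scrape_max = None
--         travel_min = None
--         travel_max = None
--         for r in latest.get(vk, []):
--             s = r.get("scrape_date")
--             if s:
--                 scrape_max = s if scrape_max is None else max(scrape_max, s)
--             t = r.get("travel_date")
--             if t:
--                 travel_min = t if travel_min is None else min(travel_min, t)
--                 travel_max = t if travel_max is None else max(travel_max, t)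
--         coverage[vk] = {
--             "scrape_date": scrape_max,
--             "travel_from": travel_min,
--             "travel_through": travel_max,
--         }
--     return coverage
-- ===== Notes on version B (the rewrite author's own statement) =====
-- stated objective: alternative
-- what changed: A builds a set of scrape dates plus a fully sorted list of travel dates per venue and then takes max/first/last; B makes one pass over the rows maintaining three running Optional accumulators (scrape max, travel min, travel max), with no set and no sort.
import Mathlib
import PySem

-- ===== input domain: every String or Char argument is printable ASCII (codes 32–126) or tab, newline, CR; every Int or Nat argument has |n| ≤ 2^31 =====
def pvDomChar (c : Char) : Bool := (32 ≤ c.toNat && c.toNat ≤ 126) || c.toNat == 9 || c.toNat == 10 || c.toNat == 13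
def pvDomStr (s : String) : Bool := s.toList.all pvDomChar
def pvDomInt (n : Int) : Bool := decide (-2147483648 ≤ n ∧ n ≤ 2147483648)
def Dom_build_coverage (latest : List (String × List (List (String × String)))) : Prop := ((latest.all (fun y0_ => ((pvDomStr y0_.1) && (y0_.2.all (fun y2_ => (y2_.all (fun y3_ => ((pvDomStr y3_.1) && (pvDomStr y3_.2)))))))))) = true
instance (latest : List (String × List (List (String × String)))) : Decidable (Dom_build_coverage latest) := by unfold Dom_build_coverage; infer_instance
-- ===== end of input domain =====

-- B replaces A's per-venue set + sorted list (multi-pass) by a single fold over the rows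
-- maintaining three running Optional accumulators (scrape max, travel min, travel max); alternative decomposition, same results.


-- ===== PORT A =====
def VENUE_KEYS : List String := ["esb", "edge", "summit", "totr"]

-- r.get(k) truthiness: key present with a non-empty string value
def pvTruthy (r : List (String × String)) (k : String) : Bool :=
  match PySem.Dict.get? (PySem.Dict.mk r) k with
  | some s => decide (s ≠ "")
  | none   => false

-- r[k] under the pvTruthy guard (key is present there)
def pvVal (r : List (String × String)) (k : String) : String :=
  (PySem.Dict.get? (PySem.Dict.mk r) k).getD ""

-- the body of A's loop over VENUE_KEYS, for one venue's rows
def pvVenueA (rows : List (List (String × String))) : List (String × Option String) :=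
  let scrape_dates : PySem.Set String :=
    PySem.Set.ofList ((rows.filter (fun r => pvTruthy r "scrape_date")).map (fun r => pvVal r "scrape_date"))
  let travel_dates : List String :=
    PySem.List.sorted ((rows.filter (fun r => pvTruthy r "travel_date")).map (fun r => pvVal r "travel_date")) (fun x => x) false
  [("scrape_date", if scrape_dates = [] then none else PySem.List.max? scrape_dates (fun x => x)),
   ("travel_from", if travel_dates = [] then none else PySem.List.pyGet? travel_dates 0),
   ("travel_through", if travel_dates = [] then none else PySem.List.pyGet? travel_dates (-1))]

def build_coverage (latest : List (String × List (List (String × String)))) : List (String × List (String × Option String)) :=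
  (VENUE_KEYS.foldl (fun coverage vk =>
    PySem.Dict.insert coverage vk (pvVenueA (PySem.Dict.getD (PySem.Dict.mk latest) vk []))) PySem.Dict.empty).items

-- ===== PORT B =====
-- "x if acc is None else max(acc, x)" / min
def pvMaxO (a : Option String) (x : String) : Option String :=
  match a with | none => some x | some m => some (max m x)

def pvMinO (a : Option String) (x : String) : Option String :=
  match a with | none => some x | some m => some (min m x)

-- the body of B's inner loop: update (scrape_max, travel_min, travel_max) from one row
def pvStep (acc : Option String × Option String × Option String) (r : List (String × String)) :
    Option String × Option String × Option String :=
  let acc :=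
    match PySem.Dict.get? (PySem.Dict.mk r) "scrape_date" with
    | some s => if s ≠ "" then (pvMaxO acc.1 s, acc.2.1, acc.2.2) else acc
    | none   => acc
  match PySem.Dict.get? (PySem.Dict.mk r) "travel_date" with
  | some t => if t ≠ "" then (acc.1, pvMinO acc.2.1 t, pvMaxO acc.2.2 t) else acc
  | none   => acc

def pvVenueB (rows : List (List (String × String))) : List (String × Option String) :=
  let res := rows.foldl pvStep (none, none, none)
  [("scrape_date", res.1), ("travel_from", res.2.1), ("travel_through", res.2.2)]

def build_coverage_alt (latest : List (String × List (List (String × String)))) : List (String × List (String × Option String)) :=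
  (VENUE_KEYS.foldl (fun coverage vk =>
    PySem.Dict.insert coverage vk (pvVenueB (PySem.Dict.getD (PySem.Dict.mk latest) vk []))) PySem.Dict.empty).items

-- ===== PRECONDITION & SPEC =====
def Spec_build_coverage (latest : List (String × List (List (String × String)))) (out : List (String × List (String × Option String))) : Prop := out = build_coverage_alt latest
instance (latest : List (String × List (List (String × String)))) (out : List (String × List (String × Option String))) : Decidable (Spec_build_coverage latest out) := by unfold Spec_build_coverage; infer_instance

-- ===== CLAIM (what is proved, stated in full; the proofs are below) =====
def Claim_equal_build_coverage : Prop := ∀ (latest : List (String × List (List (String × String)))), Dom_build_coverage latest → Spec_build_coverage latest (build_coverage latest)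

-- ===== LEMMAS AND PROOFS =====

-- the scrape values / travel values A's comprehensions extract
def pvSV (rows : List (List (String × String))) : List String :=
  (rows.filter (fun r => pvTruthy r "scrape_date")).map (fun r => pvVal r "scrape_date")

def pvTV (rows : List (List (String × String))) : List String :=
  (rows.filter (fun r => pvTruthy r "travel_date")).map (fun r => pvVal r "travel_date")

-- B's triple fold splits into three independent folds over the extracted value lists
theorem pv_fold_split (rows : List (List (String × String))) :
    ∀ (a b c : Option String),
      rows.foldl pvStep (a, b, c) =
        ((pvSV rows).foldl pvMaxO a, (pvTV rows).foldl pvMinO b, (pvTV rows).foldl pvMaxO c) := by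
  induction rows with
  | nil => intro a b c; simp [pvSV, pvTV]
  | cons r rs ih =>
    intro a b c
    simp only [List.foldl_cons, pvSV, pvTV, List.filter_cons]
    cases hS : PySem.Dict.get? (PySem.Dict.mk r) "scrape_date" with
    | none =>
      cases hT : PySem.Dict.get? (PySem.Dict.mk r) "travel_date" with
      | none => simp [pvStep, hS, hT, pvTruthy, pvSV, pvTV] at ih ⊢; exact ih a b c
      | some t =>
        by_cases ht : t = "" <;>
          simp [pvStep, hS, hT, pvTruthy, pvVal, ht, pvSV, pvTV] at ih ⊢ <;>
          exact ih _ _ _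
    | some s =>
      cases hT : PySem.Dict.get? (PySem.Dict.mk r) "travel_date" with
      | none =>
        by_cases hs' : s = "" <;>
          simp [pvStep, hS, hT, pvTruthy, pvVal, hs', pvSV, pvTV] at ih ⊢ <;>
          exact ih _ _ _
      | some t =>
        by_cases hs' : s = "" <;> by_cases ht : t = "" <;>
          simp [pvStep, hS, hT, pvTruthy, pvVal, hs', ht, pvSV, pvTV] at ih ⊢ <;>
          exact ih _ _ _

theorem pv_foldl_maxO_some (l : List String) : ∀ (a : String), l.foldl pvMaxO (some a) = some (l.foldl max a) := by
  induction l with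
  | nil => intro a; rfl
  | cons x t ih => intro a; rw [List.foldl_cons, show pvMaxO (some a) x = some (max a x) from rfl, ih (max a x), List.foldl_cons]

theorem pv_foldl_minO_some (l : List String) : ∀ (a : String), l.foldl pvMinO (some a) = some (l.foldl min a) := by
  induction l with
  | nil => intro a; rfl
  | cons x t ih => intro a; rw [List.foldl_cons, show pvMinO (some a) x = some (min a x) from rfl, ih (min a x), List.foldl_cons]

theorem pv_foldl_maxO_none (l : List String) : l.foldl pvMaxO none = l.max? := by
  cases l with
  | nil => rfl
  | cons x t =>
    rw [List.foldl_cons, show pvMaxO none x = some x from rfl, pv_foldl_maxO_some t x]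
    rfl

theorem pv_foldl_minO_none (l : List String) : l.foldl pvMinO none = l.min? := by
  cases l with
  | nil => rfl
  | cons x t =>
    rw [List.foldl_cons, show pvMinO none x = some x from rfl, pv_foldl_minO_some t x]
    rfl

-- in a ≤-pairwise list, the last element bounds every element
theorem pv_pairwise_getLast? (l : List String) (hp : l.Pairwise (· ≤ ·)) (x : String)
    (hx : l.getLast? = some x) : ∀ y ∈ l, y ≤ x := by
  induction l with
  | nil => simp at hx
  | cons a t ih =>
    cases t with
    | nil =>
      simp at hx
      intro y hy; simp at hy; simp [hy, hx]
    | cons b t' =>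
      rw [List.getLast?_cons_cons] at hx
      have hp' := List.pairwise_cons.mp hp
      have hxm : x ∈ b :: t' := List.mem_of_getLast? hx
      intro y hy
      rcases List.mem_cons.mp hy with h | h
      · exact h ▸ le_trans (hp'.1 x hxm) le_rfl
      · exact ih hp'.2 hx y h

-- A's scrape value (max over the set, or None) equals the running max over the value list
theorem pv_scrape_eq (sv : List String) :
    (if (PySem.Set.ofList sv : PySem.Set String) = [] then none else PySem.List.max? (PySem.Set.ofList sv) (fun x => x))
      = sv.foldl pvMaxO none := by
  rw [pv_foldl_maxO_none]
  cases hsv : sv with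
  | nil => rfl
  | cons x t =>
    have hSne : (PySem.Set.ofList (x :: t) : PySem.Set String) ≠ [] := by
      intro h
      have := (PySem.Set.mem_ofList (x :: t) x).mpr (by simp)
      simp [h] at this
    rw [if_neg hSne]
    cases hm : PySem.List.max? (PySem.Set.ofList (x :: t)) (fun x => x) with
    | none => exact absurd ((PySem.List.max?_eq_none_iff _ _).mp hm) hSne
    | some m =>
      have hmem : m ∈ (x :: t) := (PySem.Set.mem_ofList _ m).mp (PySem.List.max?_mem hm)
      have hmax : ∀ y ∈ (x :: t), y ≤ m := fun y hy =>
        PySem.List.max?_isMax hm y ((PySem.Set.mem_ofList _ y).mpr hy)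
      exact (List.max?_eq_some_iff.mpr ⟨hmem, hmax⟩).symm

-- A's travel_from (head of the sorted list, or None) equals the running min
theorem pv_travel_from_eq (tv : List String) :
    (if PySem.List.sorted tv (fun x => x) false = [] then none
     else PySem.List.pyGet? (PySem.List.sorted tv (fun x => x) false) 0)
      = tv.foldl pvMinO none := by
  rw [pv_foldl_minO_none]
  cases hts : PySem.List.sorted tv (fun x => x) false with
  | nil =>
    have : tv = [] := (PySem.List.sorted_eq_nil_iff tv _ _).mp hts
    simp [this]
  | cons m t =>
    rw [if_neg (by simp)]
    have hperm := PySem.List.sorted_perm tv (fun x => x) false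
    rw [hts] at hperm
    have hmem : m ∈ tv := hperm.mem_iff.mp List.mem_cons_self
    have hmin : ∀ y ∈ tv, m ≤ y := PySem.List.key_head_sorted_le (xs := tv) (key := fun x => x) hts
    rw [PySem.List.pyGet?_zero_cons]
    exact (List.min?_eq_some_iff.mpr ⟨hmem, hmin⟩).symm

-- A's travel_through (last of the sorted list, or None) equals the running max
theorem pv_travel_through_eq (tv : List String) :
    (if PySem.List.sorted tv (fun x => x) false = [] then none
     else PySem.List.pyGet? (PySem.List.sorted tv (fun x => x) false) (-1))
      = tv.foldl pvMaxO none := by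
  rw [pv_foldl_maxO_none]
  cases hts : PySem.List.sorted tv (fun x => x) false with
  | nil =>
    have : tv = [] := (PySem.List.sorted_eq_nil_iff tv _ _).mp hts
    simp [this]
  | cons m t =>
    rw [if_neg (by simp), PySem.List.pyGet?_neg_one]
    cases hx : (m :: t).getLast? with
    | none => simp at hx
    | some x =>
      have hperm := PySem.List.sorted_perm tv (fun x => x) false
      rw [hts] at hperm
      have hp := PySem.List.sorted_pairwise tv (fun x => x)
      rw [hts] at hp
      have hxm : x ∈ tv := hperm.mem_iff.mp (List.mem_of_getLast? hx)
      have hxmax : ∀ y ∈ tv, y ≤ x := fun y hy =>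
        pv_pairwise_getLast? _ hp x hx y (hperm.mem_iff.mpr hy)
      exact (List.max?_eq_some_iff.mpr ⟨hxm, hxmax⟩).symm

theorem pv_venue_eq (rows : List (List (String × String))) : pvVenueA rows = pvVenueB rows := by
  unfold pvVenueA pvVenueB
  rw [pv_fold_split rows none none none]
  simp only []
  rw [← pv_scrape_eq (pvSV rows), ← pv_travel_from_eq (pvTV rows), ← pv_travel_through_eq (pvTV rows)]
  rfl

-- ===== VERDICT (by name: the statement is the Claim_ definition above) =====
theorem build_coverage_spec : Claim_equal_build_coverage := by
  intro latest _
  unfold Spec_build_coverage build_coverage build_coverage_alt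
  simp only [pv_venue_eq]
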